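-- pv_equiv track=rewrite | github.com/glennfeys/Discrete-algorithms | project_4/tibo_glenn/ksubset.py | kSubsetColexUnrank
-- ===== SOURCE A (Python) =====
-- import math
--
-- def kSubsetColexUnrank(n, k, r):
--     x = n
--     T = []
--     for i in range(1,k+1):
--         while math.comb(x, k+1-i) > r:
--             x -= 1
--         T.append(x+1)
--         r -= math.comb(x, k+1-i)
--     return T
-- ===== SOURCE B (Python) =====
-- import math
--
-- def kSubsetColexUnrank(n, k, r):
--     # binary search (instead of linear descent) for each colex element
--     T = []
--     x = n
--     for m in range(k, 0, -1):
--         lo, hi = 0, x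
--         while lo < hi:
--             mid = (lo + hi + 1) // 2
--             if math.comb(mid, m) <= r:
--                 lo = mid
--             else:
--                 hi = mid - 1
--         x = lo
--         T.append(x + 1)
--         r -= math.comb(x, m)
--     return T
-- ===== Notes on version B (the rewrite author's own statement) =====
-- stated objective: alternative
-- what changed: Each loop iteration's linear descent of x (one math.comb call per decrement) is replaced by a binary search over [0, x] for the largest x with comb(x, m) <= r, using monotonicity of comb in its first argument; fewer comb calls, but each on larger arguments, so measured cost is comparable.
import Mathlib
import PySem

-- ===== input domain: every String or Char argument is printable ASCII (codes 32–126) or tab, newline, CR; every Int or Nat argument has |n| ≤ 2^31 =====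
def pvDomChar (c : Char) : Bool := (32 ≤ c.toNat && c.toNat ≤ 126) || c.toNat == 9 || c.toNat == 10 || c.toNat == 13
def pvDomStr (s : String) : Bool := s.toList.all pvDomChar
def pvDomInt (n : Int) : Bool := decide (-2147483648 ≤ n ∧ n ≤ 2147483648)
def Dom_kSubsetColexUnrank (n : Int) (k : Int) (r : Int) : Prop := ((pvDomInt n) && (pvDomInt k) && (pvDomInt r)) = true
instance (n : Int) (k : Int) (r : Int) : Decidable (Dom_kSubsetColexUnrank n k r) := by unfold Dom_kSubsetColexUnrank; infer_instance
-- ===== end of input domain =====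

-- B replaces A's linear descent of x (one comb call per decrement) by a binary search for
-- the largest x with comb(x, m) <= r; same return value on every input A returns on.

-- ===== PORT A =====
-- value of math.comb; exact for x ≥ 0 and m ≥ 0 (the only arguments either port relies on)
def pyComb (x : Int) (m : Int) : Int := ((x.toNat.choose m.toNat : Nat) : Int)

-- math.comb as Python computes it: none exactly where Python raises (a negative argument)
def pyCombA? (x : Int) (m : Int) : Option Int :=
  if x < 0 ∨ m < 0 then none else some (pyComb x m)

-- A's inner 'while math.comb(x, k+1-i) > r: x -= 1'; none = the math.comb call raised
def aWhile (x : Int) (m : Int) (r : Int) : Option Int :=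
  if h : x < 0 ∨ m < 0 then none
  else if pyComb x m > r then aWhile (x - 1) m r
  else some x
termination_by (x + 1).toNat
decreasing_by omega

-- one iteration of A's for-loop body (state: x, r, accumulated T); none = some call raised
def aStep (k : Int) (st : Option (Int × Int × List Int)) (i : Int) : Option (Int × Int × List Int) :=
  match st with
  | none => none
  | some (x, r, T) =>
    match aWhile x (k + 1 - i) r with
    | none => none
    | some x' =>
      match pyCombA? x' (k + 1 - i) with
      | none => none
      | some c => some (x', r - c, T ++ [x' + 1])

def kSubsetColexUnrank (n : Int) (k : Int) (r : Int) : List Int :=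
  match (PySem.List.pyRange 1 (k + 1) 1).foldl (aStep k) (some (n, r, [])) with
  | some (_, _, T) => T
  | none => []   -- unreachable under Pre_ (A raises exactly there)

-- ===== PORT B =====
-- midpoint bounds, needed for bSearch's termination
lemma bMid_bounds {lo hi : Int} (h : lo < hi) :
    lo < PySem.Int.floordiv (lo + hi + 1) 2 ∧ PySem.Int.floordiv (lo + hi + 1) 2 ≤ hi := by
  rw [PySem.Int.floordiv_eq_ediv_of_pos (by norm_num)]
  omega

-- B's inner binary search: 'while lo < hi: mid = (lo+hi+1)//2; …'
def bSearch (m : Int) (r : Int) (lo : Int) (hi : Int) : Int :=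
  if h : lo < hi then
    let mid := PySem.Int.floordiv (lo + hi + 1) 2
    if pyComb mid m ≤ r then bSearch m r mid hi else bSearch m r lo (mid - 1)
  else lo
termination_by (hi - lo).toNat
decreasing_by
  · have := bMid_bounds h; omega
  · have := bMid_bounds h; omega

-- one iteration of B's for-loop body
def bStep (st : Int × Int × List Int) (m : Int) : Int × Int × List Int :=
  match st with
  | (x, r, T) =>
    let x' := bSearch m r 0 x
    (x', r - pyComb x' m, T ++ [x' + 1])

def kSubsetColexUnrank_alt (n : Int) (k : Int) (r : Int) : List Int :=
  ((PySem.List.pyRange k 0 (-1)).foldl bStep (n, r, [])).2.2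

-- ===== PRECONDITION & SPEC =====
-- exactly the inputs on which the Python A returns: for k ≥ 1, math.comb raises ValueError
-- as soon as a negative argument appears, which happens iff n < 0 (first call) or r < 0
-- (x is decremented past 0); for k < 1 the loop body never runs.
def Pre_kSubsetColexUnrank (n : Int) (k : Int) (r : Int) : Prop :=
  k < 1 ∨ (0 ≤ n ∧ 0 ≤ r)
instance (n : Int) (k : Int) (r : Int) : Decidable (Pre_kSubsetColexUnrank n k r) := by
  unfold Pre_kSubsetColexUnrank; infer_instance

def pvWitness_kSubsetColexUnrank : Int × Int × Int := (7, 3, 11)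

def Spec_kSubsetColexUnrank (n : Int) (k : Int) (r : Int) (out : List Int) : Prop := out = kSubsetColexUnrank_alt n k r
instance (n : Int) (k : Int) (r : Int) (out : List Int) : Decidable (Spec_kSubsetColexUnrank n k r out) := by unfold Spec_kSubsetColexUnrank; infer_instance

-- ===== CLAIM (what is proved, stated in full; the proofs are below) =====
def Claim_equal_kSubsetColexUnrank : Prop := ∀ (n : Int) (k : Int) (r : Int), Dom_kSubsetColexUnrank n k r → Pre_kSubsetColexUnrank n k r → Spec_kSubsetColexUnrank n k r (kSubsetColexUnrank n k r)

-- ===== LEMMAS AND PROOFS =====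

-- pyComb is monotone in its first argument (on nonnegative x)
lemma pyComb_mono {a b m : Int} (hab : a ≤ b) : pyComb a m ≤ pyComb b m := by
  unfold pyComb
  exact_mod_cast Nat.choose_le_choose m.toNat (Int.toNat_le_toNat hab)

lemma pyComb_zero {m : Int} (hm : 1 ≤ m) : pyComb 0 m = 0 := by
  unfold pyComb
  rw [Nat.choose_eq_zero_of_lt (by omega)]
  rfl

-- the value both inner loops compute: the largest y in [0, x0] with pyComb y m ≤ r
def GoodIdx (x0 m r y : Int) : Prop :=
  0 ≤ y ∧ y ≤ x0 ∧ pyComb y m ≤ r ∧ ∀ z, y < z → z ≤ x0 → r < pyComb z m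

lemma GoodIdx_unique {x0 m r y y' : Int} (h : GoodIdx x0 m r y) (h' : GoodIdx x0 m r y') :
    y = y' := by
  obtain ⟨_, hyx, hyr, hall⟩ := h
  obtain ⟨_, hyx', hyr', hall'⟩ := h'
  rcases lt_trichotomy y y' with hlt | he | hgt
  · exact absurd hyr' (not_le.mpr (hall y' hlt hyx'))
  · exact he
  · exact absurd hyr (not_le.mpr (hall' y hgt hyx))

-- A's while loop returns the GoodIdx value
lemma aWhile_good : ∀ (N : Nat) (x m r : Int), x.toNat ≤ N → 0 ≤ x → 1 ≤ m → 0 ≤ r →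
    ∃ w, aWhile x m r = some w ∧ GoodIdx x m r w := by
  intro N
  induction N with
  | zero =>
    intro x m r hN hx hm hr
    have hx0 : x = 0 := by omega
    subst hx0
    refine ⟨0, ?_, le_refl 0, le_refl 0, by rw [pyComb_zero hm]; exact hr, ?_⟩
    · rw [aWhile]
      rw [dif_neg (by omega), if_neg (by rw [pyComb_zero hm]; omega)]
    · intro z h1 h2; omega
  | succ N ih =>
    intro x m r hN hx hm hr
    rw [aWhile, dif_neg (by omega)]
    by_cases hc : pyComb x m > r
    · -- decrement; x ≠ 0 since pyComb 0 m = 0 ≤ r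
      have hx0 : x ≠ 0 := by
        intro h; subst h; rw [pyComb_zero hm] at hc; omega
      have hx1 : 0 ≤ x - 1 := by omega
      obtain ⟨w, hw, hg⟩ := ih (x - 1) m r (by omega) hx1 hm hr
      refine ⟨w, ?_, hg.1, by have := hg.2.1; omega, hg.2.2.1, ?_⟩
      · rw [if_pos hc]; exact hw
      · intro z h1 h2
        rcases eq_or_lt_of_le h2 with he | hlt
        · subst he; exact hc
        · exact hg.2.2.2 z h1 (by omega)
    · exact ⟨x, by rw [if_neg hc], hx, le_refl x, by omega, by intro z h1 h2; omega⟩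

-- B's binary search returns the GoodIdx value
lemma bSearch_good : ∀ (M : Nat) (x0 m r lo hi : Int), (hi - lo).toNat ≤ M →
    0 ≤ lo → lo ≤ hi → hi ≤ x0 → pyComb lo m ≤ r →
    (∀ z, hi < z → z ≤ x0 → r < pyComb z m) →
    GoodIdx x0 m r (bSearch m r lo hi) := by
  intro M
  induction M with
  | zero =>
    intro x0 m r lo hi hM h0 hlh hhx hlo hall
    have : lo = hi := by omega
    subst this
    rw [bSearch, dif_neg (by omega)]
    exact ⟨h0, by omega, hlo, fun z h1 h2 => hall z h1 h2⟩
  | succ M ih =>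
    intro x0 m r lo hi hM h0 hlh hhx hlo hall
    rw [bSearch]
    by_cases h : lo < hi
    · rw [dif_pos h]
      have hmid := bMid_bounds h
      set mid := PySem.Int.floordiv (lo + hi + 1) 2 with hmiddef
      by_cases hc : pyComb mid m ≤ r
      · rw [if_pos hc]
        exact ih x0 m r mid hi (by omega) (by omega) (by omega) hhx hc hall
      · rw [if_neg hc]
        refine ih x0 m r lo (mid - 1) (by omega) h0 (by omega) (by omega) hlo ?_
        intro z h1 h2
        by_cases hz : z ≤ hi
        · exact lt_of_lt_of_le (not_le.mp hc) (pyComb_mono (by omega))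
        · exact hall z (by omega) h2
    · rw [dif_neg h]
      have : lo = hi := by omega
      subst this
      exact ⟨h0, by omega, hlo, fun z h1 h2 => hall z h1 h2⟩

-- the two inner loops agree
lemma aWhile_eq_bSearch {x m r : Int} (hx : 0 ≤ x) (hm : 1 ≤ m) (hr : 0 ≤ r) :
    aWhile x m r = some (bSearch m r 0 x) := by
  obtain ⟨w, hw, hg⟩ := aWhile_good x.toNat x m r (le_refl _) hx hm hr
  have hg' : GoodIdx x m r (bSearch m r 0 x) :=
    bSearch_good (x - 0).toNat x m r 0 x (le_refl _) (le_refl 0) hx (le_refl x)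
      (by rw [pyComb_zero hm]; exact hr) (by intro z h1 h2; omega)
  rw [hw, GoodIdx_unique hg hg']

-- the two for-loops agree, iteration by iteration
lemma loop_eq (k : Int) : ∀ (l : List Int) (x r : Int) (T : List Int),
    0 ≤ x → 0 ≤ r → (∀ i ∈ l, 1 ≤ k + 1 - i) →
    List.foldl (aStep k) (some (x, r, T)) l
      = some (List.foldl bStep (x, r, T) (l.map (fun i => k + 1 - i))) := by
  intro l
  induction l with
  | nil => intro x r T _ _ _; rfl
  | cons i l ih =>
    intro x r T hx hr hall
    have hm : 1 ≤ k + 1 - i := hall i (List.mem_cons_self)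
    have hws := aWhile_eq_bSearch hx hm hr
    set x' := bSearch (k + 1 - i) r 0 x with hx'def
    have hg : GoodIdx x (k + 1 - i) r x' :=
      bSearch_good (x - 0).toNat x (k + 1 - i) r 0 x (le_refl _) (le_refl 0) hx (le_refl x)
        (by rw [pyComb_zero hm]; exact hr) (by intro z h1 h2; omega)
    simp only [List.foldl_cons, List.map_cons]
    have hstepA : aStep k (some (x, r, T)) i = some (x', r - pyComb x' (k + 1 - i), T ++ [x' + 1]) := by
      simp only [aStep, hws]
      rw [pyCombA?, if_neg (by push Not; exact ⟨hg.1, by omega⟩)]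
    have hstepB : bStep (x, r, T) (k + 1 - i) = (x', r - pyComb x' (k + 1 - i), T ++ [x' + 1]) := by
      simp only [bStep, ← hx'def]
    rw [hstepA, hstepB]
    exact ih x' (r - pyComb x' (k + 1 - i)) (T ++ [x' + 1]) hg.1 (by have := hg.2.2.1; omega) (fun j hj => hall j (List.mem_cons_of_mem i hj))

-- A's index range, mapped by i ↦ k+1-i, is B's m range
lemma range_map (k : Int) :
    (PySem.List.pyRange 1 (k + 1) 1).map (fun i => k + 1 - i) = PySem.List.pyRange k 0 (-1) := by
  rw [PySem.List.pyRange_one]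
  simp only [PySem.List.pyRange]
  norm_num
  by_cases hk : 0 < k
  case neg =>
    rw [if_neg (by omega)]
    have h0 : k.toNat = 0 := by omega
    rw [h0]
    rfl
  case pos =>
    rw [if_pos hk]
    apply List.map_congr_left
    intro a _
    simp only [Function.comp_apply]
    ring

-- B's range is empty when k < 1
lemma rangeB_nil {k : Int} (hk : k < 1) : PySem.List.pyRange k 0 (-1) = [] := by
  simp only [PySem.List.pyRange]
  norm_num
  intro h
  omega

-- A's range is empty when k < 1
lemma rangeA_nil {k : Int} (hk : k < 1) : PySem.List.pyRange 1 (k + 1) 1 = [] := by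
  rw [PySem.List.pyRange_one]
  have h0 : (k + 1 - 1).toNat = 0 := by omega
  rw [h0]
  rfl

-- ===== VERDICT (by name: the statement is the Claim_ definition above) =====
theorem kSubsetColexUnrank_spec : Claim_equal_kSubsetColexUnrank := by
  unfold Claim_equal_kSubsetColexUnrank
  intro n k r _ hpre
  unfold Spec_kSubsetColexUnrank kSubsetColexUnrank kSubsetColexUnrank_alt
  rcases hpre with hk | ⟨hn, hr⟩
  · rw [rangeA_nil hk, rangeB_nil hk]
    rfl
  · rw [loop_eq k _ n r [] hn hr ?side, range_map]
    case side =>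
      intro i hi
      have := (PySem.List.mem_pyRange_one).mp hi
      omega
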